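-- pv_equiv track=rewrite | github.com/Prasham27/detective-atpg | DETECTive_submission/fault_sim.py | _eval_gate
-- ===== SOURCE A (Python) =====
-- from typing import Dict, List, Optional
--
-- def _eval_gate(gtype: str, inputs: List[int]) -> int:
--     """Pure 2-valued gate evaluator. Inputs are ints 0 or 1."""
--     t = gtype.upper()
--     if t == "AND":
--         out = 1
--         for v in inputs:
--             out &= v
--         return out
--     if t == "NAND":
--         out = 1
--         for v in inputs:
--             out &= v
--         return 1 - out
--     if t == "OR":
--         out = 0
--         for v in inputs:
--             out |= v
--         return out
--     if t == "NOR":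
--         out = 0
--         for v in inputs:
--             out |= v
--         return 1 - out
--     if t == "XOR":
--         out = 0
--         for v in inputs:
--             out ^= v
--         return out
--     if t == "XNOR":
--         out = 0
--         for v in inputs:
--             out ^= v
--         return 1 - out
--     if t == "NOT":
--         return 1 - inputs[0]
--     if t == "BUF":
--         return inputs[0]
--     raise ValueError(f"Unsupported gate type: {gtype}")
-- ===== SOURCE B (Python) =====
-- # Divide-and-conquer gate evaluator: the gate name is normalized to a base op
-- # plus an invert flag, and the inputs are reduced by a balanced binary tree
-- # (recursive halving) instead of a left-to-right accumulator loop; correct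
-- # because &, | and ^ are associative.
--
-- def _tree(op, xs, lo, hi):
--     """Reduce xs[lo:hi] (nonempty) by op over a balanced binary tree."""
--     if hi - lo == 1:
--         return xs[lo]
--     mid = (lo + hi) // 2
--     return op(_tree(op, xs, lo, mid), _tree(op, xs, mid, hi))
--
-- def _eval_gate(gtype, inputs):
--     t = gtype.upper()
--     if t == "NOT":
--         return 1 - inputs[0]
--     if t == "BUF":
--         return inputs[0]
--     invert = t in ("NAND", "NOR", "XNOR")
--     core = {"NAND": "AND", "NOR": "OR", "XNOR": "XOR"}.get(t, t)
--     if core == "AND":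
--         op, unit = (lambda a, b: a & b), 1
--     elif core == "OR":
--         op, unit = (lambda a, b: a | b), 0
--     elif core == "XOR":
--         op, unit = (lambda a, b: a ^ b), 0
--     else:
--         raise ValueError(f"Unsupported gate type: {gtype}")
--     r = op(unit, _tree(op, inputs, 0, len(inputs))) if inputs else unit
--     return 1 - r if invert else r
-- ===== Notes on version B (the rewrite author's own statement) =====
-- stated objective: alternative
-- what changed: Replaces A's eight-way if-chain of left-to-right accumulator loops by gate-name normalization (base op + invert flag) and a recursive balanced-tree (divide-and-conquer) reduction of the inputs, correct by associativity of &, |, ^.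
import Mathlib
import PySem

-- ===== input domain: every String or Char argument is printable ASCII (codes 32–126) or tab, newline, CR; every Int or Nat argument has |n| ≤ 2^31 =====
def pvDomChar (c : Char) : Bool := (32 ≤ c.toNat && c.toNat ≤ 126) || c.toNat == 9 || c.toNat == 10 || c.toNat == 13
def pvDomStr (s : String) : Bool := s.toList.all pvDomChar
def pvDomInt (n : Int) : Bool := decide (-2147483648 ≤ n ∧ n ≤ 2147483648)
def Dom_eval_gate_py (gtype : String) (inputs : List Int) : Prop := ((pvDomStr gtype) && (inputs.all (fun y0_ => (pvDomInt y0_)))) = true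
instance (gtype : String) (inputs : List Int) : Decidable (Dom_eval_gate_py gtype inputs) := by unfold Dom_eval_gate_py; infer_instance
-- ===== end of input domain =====

-- B replaces A's eight-way if-chain of left-to-right accumulator loops by gate-name
-- normalization (base op + invert flag) and a recursive balanced-tree reduction of the
-- inputs (a different algorithm, correct by associativity of &, |, ^); same cost.

-- ===== PORT A =====
def eval_gate_py (gtype : String) (inputs : List Int) : Int :=
  let t := PySem.Str.upper gtype
  if t = "AND" then inputs.foldl (fun out v => PySem.Int.band out v) 1
  else if t = "NAND" then 1 - inputs.foldl (fun out v => PySem.Int.band out v) 1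
  else if t = "OR" then inputs.foldl (fun out v => PySem.Int.bor out v) 0
  else if t = "NOR" then 1 - inputs.foldl (fun out v => PySem.Int.bor out v) 0
  else if t = "XOR" then inputs.foldl (fun out v => PySem.Int.bxor out v) 0
  else if t = "XNOR" then 1 - inputs.foldl (fun out v => PySem.Int.bxor out v) 0
  else if t = "NOT" then 1 - (PySem.List.pyGet? inputs 0).getD 0  -- IndexError on []: excluded by Pre_
  else if t = "BUF" then (PySem.List.pyGet? inputs 0).getD 0      -- IndexError on []: excluded by Pre_
  else 0  -- raise ValueError: excluded by Pre_

-- ===== PORT B =====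
-- _tree of Source B: reduce xs[lo:hi] (nonempty) by op over a balanced binary tree
-- (the `hi ≤ lo + 1` guard only makes the recursion total; Python reaches the
-- base case exactly at hi - lo == 1)
def pvTree (op : Int → Int → Int) (xs : List Int) (lo hi : Nat) : Int :=
  if hi ≤ lo + 1 then (PySem.List.pyGet? xs (lo : Int)).getD 0
  else
    op (pvTree op xs lo ((lo + hi) / 2)) (pvTree op xs ((lo + hi) / 2) hi)
termination_by hi - lo
decreasing_by all_goals omega

def eval_gate_py_alt (gtype : String) (inputs : List Int) : Int :=
  let t := PySem.Str.upper gtype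
  if t = "NOT" then 1 - (PySem.List.pyGet? inputs 0).getD 0  -- IndexError on []: excluded by Pre_
  else if t = "BUF" then (PySem.List.pyGet? inputs 0).getD 0 -- IndexError on []: excluded by Pre_
  else
    let invert := t = "NAND" ∨ t = "NOR" ∨ t = "XNOR"
    let core := (([("NAND", "AND"), ("NOR", "OR"), ("XNOR", "XOR")] : List (String × String)).lookup t).getD t
    let pick : Option ((Int → Int → Int) × Int) :=
      if core = "AND" then some (PySem.Int.band, 1)
      else if core = "OR" then some (PySem.Int.bor, 0)
      else if core = "XOR" then some (PySem.Int.bxor, 0)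
      else none
    match pick with
    | some (op, unit) =>
        let r := if inputs ≠ [] then op unit (pvTree op inputs 0 inputs.length) else unit
        if invert then 1 - r else r
    | none => 0  -- raise ValueError: excluded by Pre_

-- ===== PRECONDITION & SPEC =====
-- Pre_ excludes exactly the inputs where A raises: an unsupported gate name
-- (ValueError) and NOT/BUF with an empty input list (IndexError).
def Pre_eval_gate_py (gtype : String) (inputs : List Int) : Prop :=
  PySem.Str.upper gtype ∈ ["AND", "NAND", "OR", "NOR", "XOR", "XNOR"] ∨
  (PySem.Str.upper gtype ∈ ["NOT", "BUF"] ∧ inputs ≠ [])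
instance (gtype : String) (inputs : List Int) : Decidable (Pre_eval_gate_py gtype inputs) := by
  unfold Pre_eval_gate_py; infer_instance

def pvWitness_eval_gate_py : String × List Int := ("nand", [0, 1])

def Spec_eval_gate_py (gtype : String) (inputs : List Int) (out : Int) : Prop := out = eval_gate_py_alt gtype inputs
instance (gtype : String) (inputs : List Int) (out : Int) : Decidable (Spec_eval_gate_py gtype inputs out) := by unfold Spec_eval_gate_py; infer_instance

-- ===== CLAIM (what is proved, stated in full; the proofs are below) =====
def Claim_equal_eval_gate_py : Prop := ∀ (gtype : String) (inputs : List Int), Dom_eval_gate_py gtype inputs → Pre_eval_gate_py gtype inputs → Spec_eval_gate_py gtype inputs (eval_gate_py gtype inputs)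

-- ===== LEMMAS AND PROOFS =====

-- subtracting a submask is bitwise difference: m - (m & n) = m \ n
lemma pv_submask (m n : Nat) : m - (m &&& n) = Nat.ldiff m n := by
  induction m using Nat.strong_induction_on generalizing n with
  | _ m ih =>
    rcases Nat.eq_zero_or_pos m with hm | hm
    · subst hm
      simp [HAnd.hAnd, AndOp.and, Nat.land, Nat.ldiff, Nat.bitwise_zero_left]
    rcases Nat.eq_zero_or_pos n with hn | hn
    · subst hn
      simp [HAnd.hAnd, AndOp.and, Nat.land, Nat.ldiff, Nat.bitwise_zero_right]
    have hand : m &&& n = Nat.bit ((m.bodd) && (n.bodd)) ((m/2) &&& (n/2)) := by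
      show Nat.land m n = _
      rw [Nat.land, Nat.bitwise_of_ne_zero (by omega) (by omega)]; rfl
    have hld : Nat.ldiff m n = Nat.bit ((m.bodd) && !(n.bodd)) (Nat.ldiff (m/2) (n/2)) := by
      rw [Nat.ldiff, Nat.bitwise_of_ne_zero (by omega) (by omega)]
    have ihh := ih (m/2) (by omega) (n := n/2)
    have hle : (m/2) &&& (n/2) ≤ m/2 := Nat.and_le_left
    have hmod := Nat.mod_two_of_bodd m
    have hdm := Nat.div_add_mod m 2
    rw [hand, hld, Nat.bit_val, Nat.bit_val]
    cases hb1 : m.bodd <;> cases hb2 : n.bodd <;>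
      simp only [hb1, hb2, Bool.and_true, Bool.and_false, Bool.not_true, Bool.not_false,
        Bool.toNat_true, Bool.toNat_false, hb1 ▸ hmod] at * <;>
      omega

-- the values of band/bor/bxor on the two Int constructors
lemma enc_band_nn (m n : Nat) : PySem.Int.band (Int.ofNat m) (Int.ofNat n) = Int.ofNat (m &&& n) := by
  simp [PySem.Int.band, Int.natCast_nonneg]

lemma enc_band_ns (m n : Nat) : PySem.Int.band (Int.ofNat m) (Int.negSucc n) = Int.ofNat (Nat.ldiff m n) := by
  have h1 : ¬ (0:Int) ≤ Int.negSucc n := by omega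
  have h2 : (-(Int.negSucc n) - 1).toNat = n := by simp [Int.negSucc_eq]
  simp [PySem.Int.band, Int.natCast_nonneg, h1, h2, pv_submask]

lemma enc_band_sn (m n : Nat) : PySem.Int.band (Int.negSucc m) (Int.ofNat n) = Int.ofNat (Nat.ldiff n m) := by
  have h1 : ¬ (0:Int) ≤ Int.negSucc m := by omega
  have h2 : (-(Int.negSucc m) - 1).toNat = m := by simp [Int.negSucc_eq]
  simp [PySem.Int.band, Int.natCast_nonneg, h1, h2, pv_submask]

lemma enc_band_ss (m n : Nat) : PySem.Int.band (Int.negSucc m) (Int.negSucc n) = Int.negSucc (m ||| n) := by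
  have h1 : ¬ (0:Int) ≤ Int.negSucc m := by omega
  have h1' : ¬ (0:Int) ≤ Int.negSucc n := by omega
  have h2 : (-(Int.negSucc m) - 1).toNat = m := by simp [Int.negSucc_eq]
  have h2' : (-(Int.negSucc n) - 1).toNat = n := by simp [Int.negSucc_eq]
  simp [PySem.Int.band, h1, h1', h2, h2', Int.negSucc_eq]
  omega

lemma enc_bor_nn (m n : Nat) : PySem.Int.bor (Int.ofNat m) (Int.ofNat n) = Int.ofNat (m ||| n) := by
  simp [PySem.Int.bor, Int.natCast_nonneg]

lemma enc_bor_ns (m n : Nat) : PySem.Int.bor (Int.ofNat m) (Int.negSucc n) = Int.negSucc (Nat.ldiff n m) := by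
  have h1 : ¬ (0:Int) ≤ Int.negSucc n := by omega
  have h2 : (-(Int.negSucc n) - 1).toNat = n := by simp [Int.negSucc_eq]
  simp [PySem.Int.bor, Int.natCast_nonneg, h1, h2, pv_submask, Int.negSucc_eq]
  omega

lemma enc_bor_sn (m n : Nat) : PySem.Int.bor (Int.negSucc m) (Int.ofNat n) = Int.negSucc (Nat.ldiff m n) := by
  have h1 : ¬ (0:Int) ≤ Int.negSucc m := by omega
  have h2 : (-(Int.negSucc m) - 1).toNat = m := by simp [Int.negSucc_eq]
  simp [PySem.Int.bor, Int.natCast_nonneg, h1, h2, pv_submask, Int.negSucc_eq]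
  omega

lemma enc_bor_ss (m n : Nat) : PySem.Int.bor (Int.negSucc m) (Int.negSucc n) = Int.negSucc (m &&& n) := by
  have h1 : ¬ (0:Int) ≤ Int.negSucc m := by omega
  have h1' : ¬ (0:Int) ≤ Int.negSucc n := by omega
  have h2 : (-(Int.negSucc m) - 1).toNat = m := by simp [Int.negSucc_eq]
  have h2' : (-(Int.negSucc n) - 1).toNat = n := by simp [Int.negSucc_eq]
  simp [PySem.Int.bor, h1, h1', h2, h2', Int.negSucc_eq]
  omega

lemma enc_bxor_nn (m n : Nat) : PySem.Int.bxor (Int.ofNat m) (Int.ofNat n) = Int.ofNat (m ^^^ n) := by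
  simp [PySem.Int.bxor, Int.natCast_nonneg]

lemma enc_bxor_ns (m n : Nat) : PySem.Int.bxor (Int.ofNat m) (Int.negSucc n) = Int.negSucc (m ^^^ n) := by
  have h1 : ¬ (0:Int) ≤ Int.negSucc n := by omega
  have h2 : (-(Int.negSucc n) - 1).toNat = n := by simp [Int.negSucc_eq]
  simp [PySem.Int.bxor, Int.natCast_nonneg, h1, h2, Int.negSucc_eq]
  omega

lemma enc_bxor_sn (m n : Nat) : PySem.Int.bxor (Int.negSucc m) (Int.ofNat n) = Int.negSucc (m ^^^ n) := by
  have h1 : ¬ (0:Int) ≤ Int.negSucc m := by omega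
  have h2 : (-(Int.negSucc m) - 1).toNat = m := by simp [Int.negSucc_eq]
  simp [PySem.Int.bxor, Int.natCast_nonneg, h1, h2, Int.negSucc_eq]
  omega

lemma enc_bxor_ss (m n : Nat) : PySem.Int.bxor (Int.negSucc m) (Int.negSucc n) = Int.ofNat (m ^^^ n) := by
  have h1 : ¬ (0:Int) ≤ Int.negSucc m := by omega
  have h1' : ¬ (0:Int) ≤ Int.negSucc n := by omega
  have h2 : (-(Int.negSucc m) - 1).toNat = m := by simp [Int.negSucc_eq]
  have h2' : (-(Int.negSucc n) - 1).toNat = n := by simp [Int.negSucc_eq]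
  simp [PySem.Int.bxor, h1, h1', h2, h2']

lemma pv_band_assoc (a b c : Int) :
    PySem.Int.band (PySem.Int.band a b) c = PySem.Int.band a (PySem.Int.band b c) := by
  rcases a with m|m <;> rcases b with n|n <;> rcases c with p|p <;>
    simp only [enc_band_nn, enc_band_ns, enc_band_sn, enc_band_ss] <;>
    congr 1 <;>
    · apply Nat.eq_of_testBit_eq
      intro k
      simp only [Nat.testBit_and, Nat.testBit_or, Nat.testBit_ldiff]
      cases m.testBit k <;> cases n.testBit k <;> cases p.testBit k <;> rfl

lemma pv_bor_assoc (a b c : Int) :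
    PySem.Int.bor (PySem.Int.bor a b) c = PySem.Int.bor a (PySem.Int.bor b c) := by
  rcases a with m|m <;> rcases b with n|n <;> rcases c with p|p <;>
    simp only [enc_bor_nn, enc_bor_ns, enc_bor_sn, enc_bor_ss] <;>
    congr 1 <;>
    · apply Nat.eq_of_testBit_eq
      intro k
      simp only [Nat.testBit_and, Nat.testBit_or, Nat.testBit_ldiff]
      cases m.testBit k <;> cases n.testBit k <;> cases p.testBit k <;> rfl

lemma pv_bxor_assoc (a b c : Int) :
    PySem.Int.bxor (PySem.Int.bxor a b) c = PySem.Int.bxor a (PySem.Int.bxor b c) := by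
  rcases a with m|m <;> rcases b with n|n <;> rcases c with p|p <;>
    simp only [enc_bxor_nn, enc_bxor_ns, enc_bxor_sn, enc_bxor_ss] <;>
    congr 1 <;>
    · apply Nat.eq_of_testBit_eq
      intro k
      simp only [Nat.testBit_xor]
      cases m.testBit k <;> cases n.testBit k <;> cases p.testBit k <;> rfl

-- tree reduction of the slice xs[lo:hi] equals the left fold over that slice
lemma pvTree_foldl (op : Int → Int → Int)
    (hassoc : ∀ a b c, op (op a b) c = op a (op b c)) (xs : List Int) :
    ∀ d lo hi, hi - lo = d → lo < hi → hi ≤ xs.length → ∀ init : Int,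
      op init (pvTree op xs lo hi) = ((xs.drop lo).take (hi - lo)).foldl op init := by
  intro d
  induction d using Nat.strong_induction_on with
  | _ d ih =>
    intro lo hi hd hlt hle init
    rw [pvTree]
    by_cases hbase : hi ≤ lo + 1
    · have hhi : hi = lo + 1 := by omega
      have hlen : lo < xs.length := by omega
      simp only [hbase, if_true, PySem.List.pyGet?_natCast, List.getElem?_eq_getElem hlen,
        Option.getD_some]
      have htake : (xs.drop lo).take 1 = [xs[lo]] := by
        rw [List.drop_eq_getElem_cons hlen]
        rfl
      rw [hhi]
      simp only [Nat.add_sub_cancel_left, htake, List.foldl_cons, List.foldl_nil]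
    · have hmid1 : lo < (lo + hi) / 2 := by omega
      have hmid2 : (lo + hi) / 2 < hi := by omega
      simp only [hbase, if_false]
      rw [← hassoc]
      rw [ih ((lo + hi) / 2 - lo) (by omega) lo ((lo + hi) / 2) rfl hmid1 (by omega) init]
      rw [ih (hi - (lo + hi) / 2) (by omega) ((lo + hi) / 2) hi rfl hmid2 hle]
      have hsplit : (xs.drop lo).take (hi - lo)
          = (xs.drop lo).take ((lo + hi) / 2 - lo)
            ++ (xs.drop ((lo + hi) / 2)).take (hi - (lo + hi) / 2) := by
        have h1 : hi - lo = ((lo + hi) / 2 - lo) + (hi - (lo + hi) / 2) := by omega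
        have h2 : xs.drop ((lo + hi) / 2) = (xs.drop lo).drop ((lo + hi) / 2 - lo) := by
          rw [List.drop_drop]
          congr 1
          omega
        rw [h1, List.take_add, h2]
      rw [hsplit, List.foldl_append]

lemma pvTree_foldl_all (op : Int → Int → Int)
    (hassoc : ∀ a b c, op (op a b) c = op a (op b c)) (xs : List Int)
    (hne : xs ≠ []) (init : Int) :
    op init (pvTree op xs 0 xs.length) = xs.foldl op init := by
  have hpos : 0 < xs.length := List.length_pos_iff.mpr hne
  have h := pvTree_foldl op hassoc xs xs.length 0 xs.length rfl hpos le_rfl init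
  simpa using h

-- ===== VERDICT (by name: the statement is the Claim_ definition above) =====
theorem eval_gate_py_spec : Claim_equal_eval_gate_py := by
  intro gtype inputs _ hpre
  unfold Spec_eval_gate_py eval_gate_py eval_gate_py_alt
  rcases hpre with h | ⟨h, hne⟩ <;>
    simp only [List.mem_cons, List.not_mem_nil, or_false] at h
  · by_cases hne : inputs = []
    · rcases h with h | h | h | h | h | h <;> simp [h, hne, List.lookup]
    · rcases h with h | h | h | h | h | h <;>
        simp only [h, List.lookup] <;> simp [hne] <;>
        [rw [pvTree_foldl_all _ pv_band_assoc _ hne];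
         rw [pvTree_foldl_all _ pv_band_assoc _ hne];
         rw [pvTree_foldl_all _ pv_bor_assoc _ hne];
         rw [pvTree_foldl_all _ pv_bor_assoc _ hne];
         rw [pvTree_foldl_all _ pv_bxor_assoc _ hne];
         rw [pvTree_foldl_all _ pv_bxor_assoc _ hne]]
  · rcases h with h | h <;> simp [h]
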